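-- pv_equiv track=rewrite | github.com/MohammadT76/Python-Project | Python Programs/Numbers of Letters of Numbers.py | numbers_of_letters
-- ===== SOURCE A (Python) =====
-- def number_2_word(n):
--     # for more information see this link : https://www.askpython.com/python/examples/convert-number-to-words
--
--     arr = ['zero','one','two','three','four','five','six','seven','eight','nine']
--     # If all the digits are encountered return blank string
--     if(n==0):
--         return ""
--     else:
--         # compute spelling for the last digit
--         small_ans = arr[n%10]
--         # keep computing for the previous digits and add the spelling for the last digit
--         ans = number_2_word(int(n/10)) + small_ans + ""
--     # Return the final answer
--     return ans
--
-- def numbers_of_letters(n):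
--     temp = n
--     li = []
--     while True:
--         num = number_2_word(temp)
--         li.append(num)
--         if len(li) > 1 or len(num) == temp:
--             if len(num) == temp:
--                 return li
--         temp = len(num)
-- ===== SOURCE B (Python) =====
-- def spell(n):
--     # collect the decimal digits least-significant first, then join their words MSB-first
--     arr = ['zero','one','two','three','four','five','six','seven','eight','nine']
--     digits = []
--     while n != 0:
--         digits.append(n % 10)
--         n = int(n / 10)
--     return "".join(arr[d] for d in reversed(digits))
--
-- def numbers_of_letters(n):
--     def chase(temp):
--         num = spell(temp)
--         if len(num) == temp:
--             return [num]
--         return [num] + chase(len(num))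
--     return chase(n)
-- ===== Notes on version B (the rewrite author's own statement) =====
-- stated objective: alternative
-- what changed: The spelling is computed by first extracting the digit list (LSB-first) with a loop and then joining the reversed digits' words, instead of A's direct recursion over digits; the outer while-True loop becomes a recursive chase that builds the list front-to-back instead of appending to an accumulator.
import Mathlib
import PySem

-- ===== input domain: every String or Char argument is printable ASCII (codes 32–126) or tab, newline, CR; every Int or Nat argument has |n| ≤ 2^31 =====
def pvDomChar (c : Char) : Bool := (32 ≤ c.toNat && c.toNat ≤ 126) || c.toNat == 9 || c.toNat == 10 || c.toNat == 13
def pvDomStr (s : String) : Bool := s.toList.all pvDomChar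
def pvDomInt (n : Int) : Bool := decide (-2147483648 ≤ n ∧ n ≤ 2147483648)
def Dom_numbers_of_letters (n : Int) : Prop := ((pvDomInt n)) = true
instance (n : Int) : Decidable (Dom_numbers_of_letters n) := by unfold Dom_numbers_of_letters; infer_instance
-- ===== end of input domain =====

-- B spells a number by extracting its digit list with a loop and joining the reversed
-- digits' words, and replaces the while-True loop by a recursion building the list
-- front-to-back; objective: alternative decomposition, same cost.

-- termination measure fact for both digit recursions (int(n/10) is exact trunc division on Dom; PySem.Int.truncdiv)
theorem pvTruncdiv_ten_natAbs_lt (n : Int) (h : ¬ n = 0) :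
    (PySem.Int.truncdiv n 10).natAbs < n.natAbs := by
  simp only [PySem.Int.truncdiv]
  rw [Int.natAbs_tdiv]
  exact Nat.div_lt_self (Int.natAbs_pos.mpr h) (by norm_num)

-- ===== PORT A =====
-- arr[n%10]: n%10 ∈ [0,9] always in Python, so the pyGetD default is never used
def pvArr : List String := ["zero","one","two","three","four","five","six","seven","eight","nine"]

-- number_2_word, A's recursive helper; int(n/10) = PySem.Int.truncdiv n 10 (exact for |n| < 2^53)
def pvN2w (n : Int) : String :=
  if n = 0 then ""
  else pvN2w (PySem.Int.truncdiv n 10) ++ PySem.List.pyGetD pvArr (PySem.Int.mod n 10) "" ++ ""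
termination_by n.natAbs
decreasing_by exact pvTruncdiv_ten_natAbs_lt n (by assumption)

-- the while True loop; fuel is only a totality guard (the loop returns long before 100 iterations on Dom)
def pvLoopA (fuel : Nat) (temp : Int) (li : List String) : List String :=
  match fuel with
  | 0 => li
  | f + 1 =>
    let num := pvN2w temp
    let li := li ++ [num]
    if li.length > 1 ∨ PySem.Str.len num = temp then
      if PySem.Str.len num = temp then li
      else pvLoopA f (PySem.Str.len num) li
    else pvLoopA f (PySem.Str.len num) li

def numbers_of_letters (n : Int) : List String := pvLoopA 100 n []

-- ===== PORT B =====
-- the digit-collecting loop of spell: while n != 0: digits.append(n % 10); n = int(n / 10)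
def pvDigitsLoop (n : Int) (digits : List Int) : List Int :=
  if n = 0 then digits
  else pvDigitsLoop (PySem.Int.truncdiv n 10) (digits ++ [PySem.Int.mod n 10])
termination_by n.natAbs
decreasing_by exact pvTruncdiv_ten_natAbs_lt n (by assumption)

-- spell: "".join(arr[d] for d in reversed(digits))
def pvSpell (n : Int) : String :=
  PySem.Str.join "" ((pvDigitsLoop n []).reverse.map (fun d => PySem.List.pyGetD pvArr d ""))

-- chase builds the result list front-to-back; fuel is only a totality guard
def pvChase (fuel : Nat) (temp : Int) : List String :=
  match fuel with
  | 0 => []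
  | f + 1 =>
    let num := pvSpell temp
    if PySem.Str.len num = temp then [num]
    else num :: pvChase f (PySem.Str.len num)

def numbers_of_letters_alt (n : Int) : List String := pvChase 100 n

-- ===== PRECONDITION & SPEC =====
def Spec_numbers_of_letters (n : Int) (out : List String) : Prop := out = numbers_of_letters_alt n
instance (n : Int) (out : List String) : Decidable (Spec_numbers_of_letters n out) := by unfold Spec_numbers_of_letters; infer_instance

-- ===== CLAIM (what is proved, stated in full; the proofs are below) =====
def Claim_equal_numbers_of_letters : Prop := ∀ (n : Int), Dom_numbers_of_letters n → Spec_numbers_of_letters n (numbers_of_letters n)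

-- ===== LEMMAS AND PROOFS =====

-- Chars.join with empty separator distributes over list append
theorem pvJoin_append (xs ys : List (List Char)) :
    PySem.Chars.join [] (xs ++ ys) = PySem.Chars.join [] xs ++ PySem.Chars.join [] ys := by
  induction xs with
  | nil => simp [PySem.Chars.join_nil]
  | cons a t ih =>
    cases t with
    | nil => cases ys with
      | nil => simp [PySem.Chars.join_singleton, PySem.Chars.join_nil]
      | cons b u => simp [PySem.Chars.join_singleton, PySem.Chars.join_cons_cons]
    | cons b u => simp [PySem.Chars.join_cons_cons] at ih ⊢; simp [ih]

-- Str.join "" distributes over append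
theorem pvStrJoin_append (xs ys : List String) :
    PySem.Str.join "" (xs ++ ys) = PySem.Str.join "" xs ++ PySem.Str.join "" ys := by
  simp [PySem.Str.join, pvJoin_append]

-- Str.join "" on a one-element list
theorem pvStrJoin_singleton (s : String) : PySem.Str.join "" [s] = s := by
  simp [PySem.Str.join, PySem.Chars.join_singleton]

-- the digit accumulator factors out
theorem pvDigitsLoop_acc (n : Int) (ds : List Int) :
    pvDigitsLoop n ds = ds ++ pvDigitsLoop n [] := by
  conv_lhs => rw [pvDigitsLoop]
  conv_rhs => rw [pvDigitsLoop]
  split_ifs with h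
  · simp
  · rw [pvDigitsLoop_acc (PySem.Int.truncdiv n 10) (ds ++ [PySem.Int.mod n 10])]
    simp only [List.nil_append]
    rw [pvDigitsLoop_acc (PySem.Int.truncdiv n 10) [PySem.Int.mod n 10]]
    simp
termination_by n.natAbs
decreasing_by all_goals exact pvTruncdiv_ten_natAbs_lt n h

-- B's spell computes A's recursive spelling
theorem pvSpell_eq (n : Int) : pvSpell n = pvN2w n := by
  rw [pvSpell, pvN2w, pvDigitsLoop]
  split_ifs with h
  · decide
  · rw [pvDigitsLoop_acc]
    simp only [List.nil_append, List.reverse_append, List.reverse_cons, List.reverse_nil,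
      List.map_append, List.map_cons, List.map_nil]
    rw [pvStrJoin_append, pvStrJoin_singleton]
    have := pvSpell_eq (PySem.Int.truncdiv n 10)
    rw [pvSpell] at this
    rw [this]
    simp
termination_by n.natAbs
decreasing_by exact pvTruncdiv_ten_natAbs_lt n h

-- the outer loops agree
theorem pvLoop_eq (fuel : Nat) (temp : Int) (li : List String) :
    pvLoopA fuel temp li = li ++ pvChase fuel temp := by
  induction fuel generalizing temp li with
  | zero => simp [pvLoopA, pvChase]
  | succ f ih =>
    rw [pvLoopA, pvChase]
    simp only [pvSpell_eq]
    by_cases h : ((pvN2w temp).length : Int) = temp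
    · simp [PySem.Str.len_eq, h]
    · simp [PySem.Str.len_eq, h, ih]

-- ===== VERDICT (by name: the statement is the Claim_ definition above) =====
theorem numbers_of_letters_spec : Claim_equal_numbers_of_letters := by
  intro n _
  unfold Spec_numbers_of_letters numbers_of_letters numbers_of_letters_alt
  exact pvLoop_eq 100 n []
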